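-- pv_equiv track=rewrite | github.com/JesseLee2/multiLevel | coffe/transistor_sizing.py | format_transistor_sizes_to_sizing_primitives
-- ===== SOURCE A (Python) =====
-- def format_transistor_sizes_to_sizing_primitives(transistor_sizes):
--     """formot all the transistors names to primitive sizing names.
--         Notably, nmos and pmos of a invertor are treated as one sizing unit"""
--     format_sizes = {}
--     for tran_name, size in transistor_sizes.items():
--         stripped_name = tran_name.replace("_nmos", "")
--         stripped_name = stripped_name.replace("_pmos", "")
--         if "inv_" in stripped_name:
--             if stripped_name in format_sizes.keys():
--                 if size < format_sizes[stripped_name]: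
--                     format_sizes[stripped_name] = size
--             else:
--                 format_sizes[stripped_name] = size
--         else:
--             format_sizes[stripped_name] = size
--     return format_sizes
-- ===== SOURCE B (Python) =====
-- def format_transistor_sizes_to_sizing_primitives(transistor_sizes):
--     """Two-pass re-implementation: group all sizes per stripped name first,
--     then reduce each group (min for inverter units, last-write-wins otherwise)."""
--     groups = {}
--     for tran_name, size in transistor_sizes.items():
--         stripped = tran_name.replace("_nmos", "").replace("_pmos", "")
--         groups.setdefault(stripped, []).append(size)
--     return {name: (min(vals) if "inv_" in name else vals[-1])
--             for name, vals in groups.items()}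
-- ===== Notes on version B (the rewrite author's own statement) =====
-- stated objective: alternative
-- what changed: Replaces A's streaming compare-and-overwrite dict update with a two-pass group-then-reduce: first collect every size per stripped name into lists, then build the result by taking min of each inverter group and the last element of each other group.
import Mathlib
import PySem

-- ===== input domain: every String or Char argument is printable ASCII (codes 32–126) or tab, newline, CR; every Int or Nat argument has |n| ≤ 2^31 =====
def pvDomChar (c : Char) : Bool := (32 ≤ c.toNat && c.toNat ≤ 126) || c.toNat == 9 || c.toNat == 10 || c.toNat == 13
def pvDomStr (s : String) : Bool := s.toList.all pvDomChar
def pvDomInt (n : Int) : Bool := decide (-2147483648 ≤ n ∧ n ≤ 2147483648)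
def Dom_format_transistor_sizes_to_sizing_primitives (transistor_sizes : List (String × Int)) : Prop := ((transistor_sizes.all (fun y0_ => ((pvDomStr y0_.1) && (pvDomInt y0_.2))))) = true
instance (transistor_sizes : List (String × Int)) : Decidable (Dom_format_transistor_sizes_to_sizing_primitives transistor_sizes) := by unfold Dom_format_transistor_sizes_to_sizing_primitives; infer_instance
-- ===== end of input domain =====

-- B changes A's streaming min/overwrite dict update into a two-pass group-then-reduce (objective: alternative, same cost).

-- ===== PORT A =====
-- tran_name.replace("_nmos", "").replace("_pmos", "")  (used verbatim by both Pythons)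
def pvStrip (s : String) : String :=
  PySem.Str.replace (PySem.Str.replace s "_nmos" "") "_pmos" ""

-- one iteration of A's loop body
def pvStepA (d : PySem.Dict String Int) (p : String × Int) : PySem.Dict String Int :=
  if PySem.Str.isIn "inv_" (pvStrip p.1) then
    match d.get? (pvStrip p.1) with
    | some v => if p.2 < v then d.insert (pvStrip p.1) p.2 else d
    | none => d.insert (pvStrip p.1) p.2
  else d.insert (pvStrip p.1) p.2

def format_transistor_sizes_to_sizing_primitives (transistor_sizes : List (String × Int)) : List (String × Int) :=
  (transistor_sizes.foldl pvStepA PySem.Dict.empty).items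

-- ===== PORT B =====
-- groups.setdefault(stripped, []).append(size)  ==  groups[stripped] = groups.get(stripped, []) + [size]
def pvGroupStep (d : PySem.Dict String (List Int)) (p : String × Int) : PySem.Dict String (List Int) :=
  d.modify (pvStrip p.1) [] (· ++ [p.2])

-- min(vals); the [] branch is unreachable (every group is nonempty; Python would raise there)
def pvMin (vs : List Int) : Int :=
  match vs with
  | [] => 0
  | v :: r => r.foldl min v

-- vals[-1]; the [] case is unreachable (every group is nonempty)
def pvLast (vs : List Int) : Int :=
  vs.getLastD 0

-- min(vals) if "inv_" in name else vals[-1]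
def pvFin (k : String) (vs : List Int) : Int :=
  if PySem.Str.isIn "inv_" k then pvMin vs else pvLast vs

def format_transistor_sizes_to_sizing_primitives_alt (transistor_sizes : List (String × Int)) : List (String × Int) :=
  let groups := transistor_sizes.foldl pvGroupStep PySem.Dict.empty
  (groups.items.foldl (fun r q => r.insert q.1 (pvFin q.1 q.2)) PySem.Dict.empty).items

-- ===== PRECONDITION & SPEC =====
def Spec_format_transistor_sizes_to_sizing_primitives (transistor_sizes : List (String × Int)) (out : List (String × Int)) : Prop := out = format_transistor_sizes_to_sizing_primitives_alt transistor_sizes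
instance (transistor_sizes : List (String × Int)) (out : List (String × Int)) : Decidable (Spec_format_transistor_sizes_to_sizing_primitives transistor_sizes out) := by unfold Spec_format_transistor_sizes_to_sizing_primitives; infer_instance

-- ===== CLAIM (what is proved, stated in full; the proofs are below) =====
def Claim_equal_format_transistor_sizes_to_sizing_primitives : Prop := ∀ (transistor_sizes : List (String × Int)), Dom_format_transistor_sizes_to_sizing_primitives transistor_sizes → Spec_format_transistor_sizes_to_sizing_primitives transistor_sizes (format_transistor_sizes_to_sizing_primitives transistor_sizes)

-- ===== LEMMAS AND PROOFS =====

-- abbreviation for "finish one group entry"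
def pvF (q : String × List Int) : String × Int := (q.1, pvFin q.1 q.2)

theorem pvMin_append (vs : List Int) (hv : vs ≠ []) (x : Int) :
    pvMin (vs ++ [x]) = min (pvMin vs) x := by
  cases vs with
  | nil => exact absurd rfl hv
  | cons v r => simp [pvMin, List.foldl_append]

theorem pvFin_singleton (k : String) (x : Int) : pvFin k [x] = x := by
  unfold pvFin pvMin pvLast; split <;> simp

-- lookup through the finished map: keys are preserved, values are finished
theorem find?_map_pvF (l : List (String × List Int)) (k : String) :
    (l.map pvF).find? (fun p => p.1 == k) = (l.find? (fun p => p.1 == k)).map pvF := by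
  induction l with
  | nil => rfl
  | cons q t ih =>
    by_cases h : q.1 = k
    · simp [pvF, h]
    · simp [pvF, h, ih]

theorem get?_of_items_map (d : PySem.Dict String Int) (g : PySem.Dict String (List Int))
    (h : d.items = g.items.map pvF) (k : String) :
    d.get? k = (g.get? k).map (pvFin k) := by
  show Option.map _ (List.find? _ d.items) = _
  rw [h, find?_map_pvF]
  show Option.map _ (Option.map _ (List.find? (fun p => p.1 == k) g.items)) = _
  cases hf : List.find? (fun p => p.1 == k) g.items with
  | none => simp [PySem.Dict.get?, hf]
  | some q =>
    have hq : q.1 = k := by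
      have := List.find?_some hf
      simpa using this
    simp [PySem.Dict.get?, hf, pvF, hq]

-- the invariant: A's dict is the pointwise finish of B's group dict
theorem pv_main (xs : List (String × Int)) :
    ∀ (d : PySem.Dict String Int) (g : PySem.Dict String (List Int)),
    d.items = g.items.map pvF →
    (∀ q ∈ g.items, q.2 ≠ []) →
    g.keys.Nodup →
    (xs.foldl pvStepA d).items = ((xs.foldl pvGroupStep g).items).map pvF := by
  induction xs with
  | nil => intro d g h _ _; simpa using h
  | cons p t ih =>
    intro d g h hne hnd
    simp only [List.foldl_cons]
    set k := pvStrip p.1 with hk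
    have hget : d.get? k = (g.get? k).map (pvFin k) := get?_of_items_map d g h k
    have hgmod : pvGroupStep g p = g.insert k (g.getD k [] ++ [p.2]) := rfl
    cases hgk : g.get? k with
    | none =>
      -- fresh key: both sides append
      have hcon : g.contains k = false := (PySem.Dict.get?_eq_none_iff_contains g k).mp hgk
      have hdget : d.get? k = none := by rw [hget, hgk]; rfl
      have hdcon : d.contains k = false := (PySem.Dict.get?_eq_none_iff_contains d k).mp hdget
      have hstep : pvStepA d p = d.insert k p.2 := by
        unfold pvStepA; rw [← hk, hdget]; split <;> rfl
      have hgD : g.getD k [] = [] := by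
        rw [PySem.Dict.getD_eq_get?_getD, hgk]; rfl
      refine ih _ _ ?_ ?_ ?_
      · rw [hstep, hgmod, hgD,
          PySem.Dict.items_insert_of_not_contains d p.2 hdcon,
          PySem.Dict.items_insert_of_not_contains g ([] ++ [p.2]) hcon]
        simp [h, pvF, pvFin_singleton]
      · rw [hgmod, hgD]
        intro q hq
        rcases (PySem.Dict.mem_items_insert _ _ _ _).mp hq with h1 | h2
        · subst h1; simp
        · exact hne q h2.1
      · rw [hgmod]; exact PySem.Dict.nodup_keys_insert g k _ hnd
    | some vs =>
      have hvs : (k, vs) ∈ g.items := PySem.Dict.mem_items_of_get?_eq_some g hgk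
      have hvne : vs ≠ [] := hne (k, vs) hvs
      have hcon : g.contains k = true := by
        rw [PySem.Dict.contains_eq_isSome_get?, hgk]; rfl
      have hdget : d.get? k = some (pvFin k vs) := by rw [hget, hgk]; rfl
      have hdcon : d.contains k = true := by
        rw [PySem.Dict.contains_eq_isSome_get?, hdget]; rfl
      have hgD : g.getD k [] = vs := by
        rw [PySem.Dict.getD_eq_get?_getD, hgk]; rfl
      have hgitems : (pvGroupStep g p).items =
          g.items.map (fun q => if q.1 == k then (k, vs ++ [p.2]) else q) := by
        rw [hgmod, hgD, PySem.Dict.items_insert_of_contains g _ hcon]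
      -- the unique entry at key k is (k, vs)
      have huniq : ∀ q ∈ g.items, q.1 = k → q = (k, vs) := by
        intro q hq hq1
        have : g.get? q.1 = some q.2 :=
          (PySem.Dict.get?_eq_some_iff_mem_items g q.1 q.2 hnd).mpr (by cases q; exact hq)
        rw [hq1, hgk] at this
        cases q with
        | mk a b => cases this; simp_all
      -- whatever d' A computes, its items are g.items with entry k replaced by the new finish
      have hkey : ∀ w : Int,
          (d.insert k w).items = g.items.map (fun q => if q.1 == k then (k, w) else pvF q) := by
        intro w
        rw [PySem.Dict.items_insert_of_contains d w hdcon, h, List.map_map]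
        apply List.map_congr_left
        intro q hq
        by_cases hqk : q.1 = k <;> simp [pvF, hqk]
      have hnew : pvFin k (vs ++ [p.2]) =
          if PySem.Str.isIn "inv_" k then min (pvMin vs) p.2 else p.2 := by
        unfold pvFin
        split <;> simp [pvMin_append vs hvne, pvLast]
      have htarget : ((pvGroupStep g p).items).map pvF =
          g.items.map (fun q => if q.1 == k then (k, pvFin k (vs ++ [p.2])) else pvF q) := by
        rw [hgitems, List.map_map]
        apply List.map_congr_left
        intro q hq
        by_cases hqk : q.1 = k <;> simp [pvF, hqk]
      have hstepitems : (pvStepA d p).items = ((pvGroupStep g p).items).map pvF := by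
        unfold pvStepA
        rw [← hk, hdget, htarget]
        by_cases hinv : PySem.Str.isIn "inv_" k = true
        · simp only [hinv, if_true]
          by_cases hlt : p.2 < pvFin k vs
          · simp only [hlt, hnew, hinv, if_true]
            rw [hkey p.2]
            apply List.map_congr_left
            intro q hq
            by_cases hqk : q.1 = k
            · have := huniq q hq hqk
              subst this
              have : pvFin k vs = pvMin vs := by unfold pvFin; rw [if_pos hinv]
              rw [this] at hlt
              simp [min_eq_right (le_of_lt hlt)]
            · simp [hqk]
          · simp only [if_neg hlt, hnew, hinv, if_true]
            rw [h]
            apply List.map_congr_left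
            intro q hq
            by_cases hqk : q.1 = k
            · have := huniq q hq hqk
              subst this
              have hm : pvFin k vs = pvMin vs := by unfold pvFin; rw [if_pos hinv]
              rw [hm] at hlt
              have hmin : min (pvMin vs) p.2 = pvMin vs := min_eq_left (le_of_not_gt hlt)
              simp only [beq_self_eq_true, if_true, hmin, pvF, pvFin, hinv]
            · simp [hqk]
        · have hinv' : PySem.Str.isIn "inv_" k = false := by simpa using hinv
          simp only [hinv', if_false, Bool.false_eq_true]
          rw [hnew, hinv', hkey p.2]
          simp
      refine ih _ _ hstepitems ?_ ?_
      · intro q hq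
        rw [hgmod] at hq
        rcases (PySem.Dict.mem_items_insert _ _ _ _).mp hq with h1 | h2
        · subst h1; simp
        · exact hne q h2.1
      · rw [hgmod]; exact PySem.Dict.nodup_keys_insert g k _ hnd

-- B's second pass: inserting each finished group into an empty dict just maps over the items
theorem pv_second_pass (g : PySem.Dict String (List Int)) (hnd : g.keys.Nodup) :
    ((g.items.foldl (fun r q => r.insert q.1 (pvFin q.1 q.2)) PySem.Dict.empty).items)
      = g.items.map pvF := by
  have := PySem.Dict.items_foldl_insert_fresh g.items (fun q => q.1) (fun q => pvFin q.1 q.2)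
    PySem.Dict.empty (by intro a _; rfl) (by exact hnd)
  simpa [pvF] using this

-- ===== VERDICT (by name: the statement is the Claim_ definition above) =====
theorem format_transistor_sizes_to_sizing_primitives_spec : Claim_equal_format_transistor_sizes_to_sizing_primitives := by
  intro ts _
  unfold Spec_format_transistor_sizes_to_sizing_primitives
  unfold format_transistor_sizes_to_sizing_primitives format_transistor_sizes_to_sizing_primitives_alt
  have hg : (ts.foldl pvGroupStep PySem.Dict.empty).keys.Nodup :=
    PySem.Dict.nodup_keys_foldl_modify_key ts (fun p => pvStrip p.1) []
      (fun _ p vs => vs ++ [p.2]) PySem.Dict.empty PySem.Dict.nodup_keys_empty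
  rw [pv_second_pass _ hg]
  exact pv_main ts PySem.Dict.empty PySem.Dict.empty (by rfl) (by intro q hq; cases hq) PySem.Dict.nodup_keys_empty
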